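-- pv_equiv track=rewrite | github.com/Mearman/PebbleOS | tools/legacy_checksum.py | legacy_defective_checksum
-- ===== SOURCE A (Python) =====
-- LOOKUP_TABLE = [
--     0x00000000, 0x04c11db7, 0x09823b6e, 0x0d4326d9,
--     0x130476dc, 0x17c56b6b, 0x1a864db2, 0x1e475005,
--     0x2608edb8, 0x22c9f00f, 0x2f8ad6d6, 0x2b4bcb61,
--     0x350c9b64, 0x31cd86d3, 0x3c8ea00a, 0x384fbdbd,
-- ]
--
-- def crc_byte(crc, input_byte):
--     """Process a single byte through the CRC."""
--     crc = (crc << 4) ^ LOOKUP_TABLE[((crc >> 28) ^ (input_byte >> 4)) & 0x0f]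
--     crc = (crc << 4) ^ LOOKUP_TABLE[((crc >> 28) ^ (input_byte >> 0)) & 0x0f]
--     return crc & 0xFFFFFFFF  # Mask to 32 bits
--
-- def legacy_defective_checksum(data):
--     """
--     Calculate the legacy defective checksum for the given data.
--
--     Args:
--         data: bytes object to calculate checksum for
--
--     Returns:
--         uint32_t checksum value
--     """
--     reg = 0xffffffff
--     accumulator = [0, 0, 0]
--     accumulated_length = 0
--
--     data_bytes = data
--     length = len(data_bytes)
--     idx = 0
--
--     # Process accumulated bytes from previous calls (not used here but part of the algorithm)
--     if accumulated_length:
--         while accumulated_length < 3 and length: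
--             accumulator[accumulated_length] = data_bytes[idx]
--             accumulated_length += 1
--             idx += 1
--             length -= 1
--
--         if accumulated_length == 3 and length:
--             reg = crc_byte(reg, data_bytes[idx])
--             idx += 1
--             length -= 1
--             reg = crc_byte(reg, accumulator[2])
--             reg = crc_byte(reg, accumulator[1])
--             reg = crc_byte(reg, accumulator[0])
--             accumulated_length = 0
--
--     # Process 4 bytes at a time in reverse order
--     while length >= 4:
--         reg = crc_byte(reg, data_bytes[idx + 3])
--         reg = crc_byte(reg, data_bytes[idx + 2])
--         reg = crc_byte(reg, data_bytes[idx + 1])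
--         reg = crc_byte(reg, data_bytes[idx + 0])
--         idx += 4
--         length -= 4
--
--     # Accumulate remaining bytes
--     while length:
--         accumulator[accumulated_length] = data_bytes[idx]
--         accumulated_length += 1
--         idx += 1
--         length -= 1
--
--     # Process final accumulated bytes with padding
--     if accumulated_length:
--         # CRC the final bytes forwards (reversed relative to the normal checksum)
--         # padded on the left(!) with null bytes.
--         for _ in range(4 - accumulated_length):
--             reg = crc_byte(reg, 0)
--         for i in range(accumulated_length):
--             reg = crc_byte(reg, accumulator[i])
--
--     return reg
-- ===== SOURCE B (Python) =====
-- LOOKUP_TABLE = [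
--     0x00000000, 0x04c11db7, 0x09823b6e, 0x0d4326d9,
--     0x130476dc, 0x17c56b6b, 0x1a864db2, 0x1e475005,
--     0x2608edb8, 0x22c9f00f, 0x2f8ad6d6, 0x2b4bcb61,
--     0x350c9b64, 0x31cd86d3, 0x3c8ea00a, 0x384fbdbd,
-- ]
--
-- def crc_byte(crc, input_byte):
--     """Process a single byte through the CRC."""
--     crc = (crc << 4) ^ LOOKUP_TABLE[((crc >> 28) ^ (input_byte >> 4)) & 0x0f]
--     crc = (crc << 4) ^ LOOKUP_TABLE[((crc >> 28) ^ (input_byte >> 0)) & 0x0f]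
--     return crc & 0xFFFFFFFF
--
-- def legacy_defective_checksum(data):
--     """Build the exact byte feed order first, then fold crc_byte over it."""
--     it = iter(data)
--     order = []
--     for quad in zip(it, it, it, it):
--         order.extend(reversed(quad))
--     r = len(data) % 4
--     if r:
--         order.extend([0] * (4 - r))
--         order.extend(data[len(data) - r:])
--     reg = 0xffffffff
--     for b in order:
--         reg = crc_byte(reg, b)
--     return reg
-- ===== Notes on version B (the rewrite author's own statement) =====
-- stated objective: simpler
-- what changed: B first builds the whole byte-feed order as one flat list (reversed 4-byte groups via zip-chunking, then the left-zero-padded tail) and folds crc_byte over it once, replacing A's interleaved idx/length counter loops, mutable 3-slot accumulator and dead accumulated-bytes block.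
import Mathlib
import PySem

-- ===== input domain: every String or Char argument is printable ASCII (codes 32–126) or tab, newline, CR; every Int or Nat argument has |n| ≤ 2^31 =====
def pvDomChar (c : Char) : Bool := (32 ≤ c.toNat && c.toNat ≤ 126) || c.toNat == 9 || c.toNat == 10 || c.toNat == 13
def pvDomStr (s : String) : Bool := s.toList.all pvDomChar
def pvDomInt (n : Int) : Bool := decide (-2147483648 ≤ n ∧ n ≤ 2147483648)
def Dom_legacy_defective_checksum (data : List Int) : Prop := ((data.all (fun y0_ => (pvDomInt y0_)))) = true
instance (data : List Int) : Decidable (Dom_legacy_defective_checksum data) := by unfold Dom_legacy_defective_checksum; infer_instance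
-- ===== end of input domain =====

-- B builds the exact byte-feed order as one flat list (chunk-of-4 reversal, then left-zero-padded tail)
-- and folds crc_byte over it, replacing A's interleaved index/accumulator loops; objective: simpler.

-- ===== PORT A =====
def LOOKUP_TABLE : List Int := [
  0x00000000, 0x04c11db7, 0x09823b6e, 0x0d4326d9,
  0x130476dc, 0x17c56b6b, 0x1a864db2, 0x1e475005,
  0x2608edb8, 0x22c9f00f, 0x2f8ad6d6, 0x2b4bcb61,
  0x350c9b64, 0x31cd86d3, 0x3c8ea00a, 0x384fbdbd]

-- helper crc_byte, shared verbatim by both Pythons; the table index is always in 0..15, so pyGetD is exact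
def crc_byte (crc input_byte : Int) : Int :=
  let crc1 := PySem.Int.bxor (crc <<< 4)
    (PySem.List.pyGetD LOOKUP_TABLE (PySem.Int.band (PySem.Int.bxor (crc >>> 28) (input_byte >>> 4)) 0x0f) 0)
  let crc2 := PySem.Int.bxor (crc1 <<< 4)
    (PySem.List.pyGetD LOOKUP_TABLE (PySem.Int.band (PySem.Int.bxor (crc1 >>> 28) (input_byte >>> 0)) 0x0f) 0)
  PySem.Int.band crc2 0xFFFFFFFF

-- A's `while length >= 4` loop (idx/length counters kept as in the Python)
def aFour (data : List Int) (reg : Int) (idx : Nat) (length : Nat) : Int × Nat × Nat :=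
  if h : 4 ≤ length then
    let reg := crc_byte reg (PySem.List.pyGetD data ((idx : Int) + 3) 0)
    let reg := crc_byte reg (PySem.List.pyGetD data ((idx : Int) + 2) 0)
    let reg := crc_byte reg (PySem.List.pyGetD data ((idx : Int) + 1) 0)
    let reg := crc_byte reg (PySem.List.pyGetD data ((idx : Int) + 0) 0)
    aFour data reg (idx + 4) (length - 4)
  else (reg, idx, length)
termination_by length
decreasing_by omega

-- A's `while length:` accumulation loop into accumulator/accumulated_length
def aRem (data : List Int) (idx : Nat) (length : Nat) (acc : List Int) (alen : Nat) : List Int × Nat :=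
  if length ≠ 0 then
    aRem data (idx + 1) (length - 1) (acc.set alen (PySem.List.pyGetD data (idx : Int) 0)) (alen + 1)
  else (acc, alen)
termination_by length

-- A's tail phase: the remainder-accumulation loop followed by the left-zero-padded final feed
def aFinish (data : List Int) (s : Int × Nat × Nat) : Int :=
  let p := aRem data s.2.1 s.2.2 [0, 0, 0] 0
  if p.2 ≠ 0 then
    let reg := (List.range (4 - p.2)).foldl (fun r _ => crc_byte r 0) s.1
    (List.range p.2).foldl (fun r i => crc_byte r (PySem.List.pyGetD p.1 (i : Int) 0)) reg
  else s.1

def legacy_defective_checksum (data : List Int) : Int :=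
  -- reg = 0xffffffff; accumulator = [0,0,0]; accumulated_length = 0.
  -- The `if accumulated_length:` block is skipped: accumulated_length is the literal 0 just assigned.
  aFinish data (aFour data 0xffffffff 0 data.length)

-- ===== PORT B =====
-- Source B's `zip(it, it, it, it)`: the full 4-byte groups, leftover (< 4) dropped
def quads : List Int → List (Int × Int × Int × Int)
  | a :: b :: c :: d :: rest => (a, b, c, d) :: quads rest
  | _ => []

def legacy_defective_checksum_alt (data : List Int) : Int :=
  let order := (quads data).foldl
    (fun ord q => ord ++ [q.2.2.2, q.2.2.1, q.2.1, q.1]) []   -- order.extend(reversed(quad))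
  let n : Int := data.length
  let r : Int := PySem.Int.mod n 4
  let order := if r ≠ 0 then
      (order ++ List.replicate (4 - r).toNat 0) ++ PySem.List.slice data (some (n - r)) none
    else order
  order.foldl crc_byte 0xffffffff

-- ===== PRECONDITION & SPEC =====
def Spec_legacy_defective_checksum (data : List Int) (out : Int) : Prop := out = legacy_defective_checksum_alt data
instance (data : List Int) (out : Int) : Decidable (Spec_legacy_defective_checksum data out) := by unfold Spec_legacy_defective_checksum; infer_instance

-- ===== CLAIM (what is proved, stated in full; the proofs are below) =====
def Claim_equal_legacy_defective_checksum : Prop := ∀ (data : List Int), Dom_legacy_defective_checksum data → Spec_legacy_defective_checksum data (legacy_defective_checksum data)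

-- ===== LEMMAS AND PROOFS =====

-- the common byte-feed order, by structural recursion (proof device shared by both directions)
def feed : List Int → List Int
  | a :: b :: c :: d :: rest => d :: c :: b :: a :: feed rest
  | [] => []
  | rest => List.replicate (4 - rest.length) 0 ++ rest

lemma feed_eq_flat (l : List Int) :
    (quads l).flatMap (fun q => [q.2.2.2, q.2.2.1, q.2.1, q.1]) ++
      (if l.length % 4 ≠ 0 then List.replicate (4 - l.length % 4) 0 ++ l.drop (l.length - l.length % 4) else []) = feed l := by
  induction l using quads.induct with
  | case1 a b c d rest ih =>
      have h4 : (a :: b :: c :: d :: rest).length = rest.length + 4 := by simp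
      have hm : (rest.length + 4) % 4 = rest.length % 4 := by omega
      simp only [quads, feed, List.flatMap_cons, h4, hm]
      have hk := Nat.mod_le rest.length 4
      rw [(by omega : rest.length + 4 - rest.length % 4 = rest.length - rest.length % 4 + 1 + 1 + 1 + 1)]
      simp only [List.drop_succ_cons, List.cons_append, List.nil_append]
      rw [ih]
  | case2 x h1 =>
      match x, h1 with
      | [], _ => simp [quads, feed]
      | [a], _ => simp [quads, feed]
      | [a,b], _ => simp [quads, feed]
      | [a,b,c], _ => simp [quads, feed]
      | a :: b :: c :: d :: rest, h => exact absurd rfl (h a b c d rest)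

lemma B_eq_feed (data : List Int) :
    legacy_defective_checksum_alt data = (feed data).foldl crc_byte 0xffffffff := by
  simp only [legacy_defective_checksum_alt]
  rw [PySem.List.foldl_append_eq_flatMap, ← feed_eq_flat data]
  have hm : PySem.Int.mod ((data.length : Nat) : Int) 4 = ((data.length % 4 : Nat) : Int) :=
    PySem.Int.mod_natCast data.length 4
  rw [hm]
  by_cases h : data.length % 4 = 0
  · simp [h]
  · have hmle := Nat.mod_le data.length 4
    have h3 : data.length % 4 ≤ 3 := by omega
    rw [if_pos (by exact_mod_cast h), if_pos h,
      (by push_cast [Nat.cast_sub hmle] ; ring :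
        ((data.length : Int) - ((data.length % 4 : Nat) : Int)) = ((data.length - data.length % 4 : Nat) : Int)),
      PySem.List.slice_from_natCast,
      (by omega : ((4 : Int) - ((data.length % 4 : Nat) : Int)).toNat = 4 - data.length % 4),
      List.nil_append, List.append_assoc]

lemma A_main (n : Nat) : ∀ (data : List Int) (idx : Nat) (reg : Int),
    data.length = idx + n →
    aFinish data (aFour data reg idx n) = (feed (data.drop idx)).foldl crc_byte reg := by
  induction n using Nat.strong_induction_on with
  | _ n ih =>
    intro data idx reg hlen
    by_cases h4 : 4 ≤ n
    · have h0 : idx < data.length := by omega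
      have h1 : idx + 1 < data.length := by omega
      have h2 : idx + 2 < data.length := by omega
      have h3 : idx + 3 < data.length := by omega
      rw [aFour, dif_pos h4]
      have e3 : PySem.List.pyGetD data ((idx : Int) + 3) 0 = data[idx + 3] := by
        rw [(by push_cast; ring : ((idx : Int) + 3) = ((idx + 3 : Nat) : Int)),
          PySem.List.pyGetD_natCast, List.getD_eq_getElem data 0 h3]
      have e2 : PySem.List.pyGetD data ((idx : Int) + 2) 0 = data[idx + 2] := by
        rw [(by push_cast; ring : ((idx : Int) + 2) = ((idx + 2 : Nat) : Int)),
          PySem.List.pyGetD_natCast, List.getD_eq_getElem data 0 h2]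
      have e1 : PySem.List.pyGetD data ((idx : Int) + 1) 0 = data[idx + 1] := by
        rw [(by push_cast; ring : ((idx : Int) + 1) = ((idx + 1 : Nat) : Int)),
          PySem.List.pyGetD_natCast, List.getD_eq_getElem data 0 h1]
      have e0 : PySem.List.pyGetD data ((idx : Int) + 0) 0 = data[idx] := by
        rw [(by ring : ((idx : Int) + 0) = ((idx : Nat) : Int)),
          PySem.List.pyGetD_natCast, List.getD_eq_getElem data 0 h0]
      rw [e3, e2, e1, e0]
      rw [ih (n - 4) (by omega) data (idx + 4) _ (by omega)]
      rw [List.drop_eq_getElem_cons h0, List.drop_eq_getElem_cons h1, List.drop_eq_getElem_cons h2,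
        List.drop_eq_getElem_cons h3]
      simp [feed]
    · rw [aFour, dif_neg h4]
      interval_cases n
      · have hdrop : data.drop idx = [] := List.drop_of_length_le (by omega)
        simp [aFinish, aRem, feed, hdrop]
      · have h0 : idx < data.length := by omega
        have hdrop : data.drop idx = [data[idx]] := by
          rw [List.drop_eq_getElem_cons h0, List.drop_of_length_le (l := data) (by omega)]
        simp [aFinish, aRem, feed, hdrop, List.range_succ, List.getElem?_eq_getElem h0]
      · have h0 : idx < data.length := by omega
        have h1 : idx + 1 < data.length := by omega
        have hdrop : data.drop idx = [data[idx], data[idx + 1]] := by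
          rw [List.drop_eq_getElem_cons h0, List.drop_eq_getElem_cons h1,
            List.drop_of_length_le (l := data) (by omega)]
        have e1 : PySem.List.pyGetD data ((idx : Int) + 1) 0 = data[idx + 1] := by
          rw [(by push_cast; ring : ((idx : Int) + 1) = ((idx + 1 : Nat) : Int)),
            PySem.List.pyGetD_natCast, List.getD_eq_getElem data 0 h1]
        simp [aFinish, aRem, feed, hdrop, List.range_succ, List.getElem?_eq_getElem h0,
          e1, PySem.List.pyGetD_ofNat']
      · have h0 : idx < data.length := by omega
        have h1 : idx + 1 < data.length := by omega
        have h2 : idx + 2 < data.length := by omega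
        have hdrop : data.drop idx = [data[idx], data[idx + 1], data[idx + 2]] := by
          rw [List.drop_eq_getElem_cons h0, List.drop_eq_getElem_cons h1,
            List.drop_eq_getElem_cons h2, List.drop_of_length_le (l := data) (by omega)]
        have e1 : PySem.List.pyGetD data ((idx : Int) + 1) 0 = data[idx + 1] := by
          rw [(by push_cast; ring : ((idx : Int) + 1) = ((idx + 1 : Nat) : Int)),
            PySem.List.pyGetD_natCast, List.getD_eq_getElem data 0 h1]
        have e2 : PySem.List.pyGetD data ((idx : Int) + 1 + 1) 0 = data[idx + 2] := by
          rw [(by push_cast; ring : ((idx : Int) + 1 + 1) = ((idx + 2 : Nat) : Int)),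
            PySem.List.pyGetD_natCast, List.getD_eq_getElem data 0 h2]
        simp [aFinish, aRem, feed, hdrop, List.range_succ, List.getElem?_eq_getElem h0,
          e1, e2, PySem.List.pyGetD_ofNat']

lemma A_eq_feed (data : List Int) :
    legacy_defective_checksum data = (feed data).foldl crc_byte 0xffffffff := by
  unfold legacy_defective_checksum
  rw [A_main data.length data 0 0xffffffff (by omega)]
  simp

-- ===== VERDICT (by name: the statement is the Claim_ definition above) =====
theorem legacy_defective_checksum_spec : Claim_equal_legacy_defective_checksum := by
  intro data _
  unfold Spec_legacy_defective_checksum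
  rw [A_eq_feed, B_eq_feed]
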